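-- pv_equiv track=rewrite | github.com/iamprahladk/aoc-2015 | day03/code.py | find_houses_delivered
-- ===== SOURCE A (Python) =====
-- def find_houses_delivered(string, return_list=False):
--     x = 0
--     y = 0
--     count = 1
--     lst = [(0, 0)]
--     for item in string:
--         if item == '^':
--             y += 1
--         elif item == 'v':
--             y -= 1
--         elif item == '>':
--             x += 1
--         elif item == '<':
--             x -= 1
--         if (x, y) not in lst:
--             lst.append((x, y))
--             count += 1
--     if return_list:
--         return lst
--     else:
--         return count
-- ===== SOURCE B (Python) =====
-- def find_houses_delivered(string, return_list=False):
--     # stage 1: cumulative x and y coordinates (booleans as 0/1), two staged passes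
--     xs = [0]
--     for item in string:
--         xs.append(xs[-1] + (item == '>') - (item == '<'))
--     ys = [0]
--     for item in string:
--         ys.append(ys[-1] + (item == '^') - (item == 'v'))
--     trajectory = list(zip(xs, ys))
--     # stage 2: collapse the trajectory
--     if return_list:
--         return list(dict.fromkeys(trajectory))
--     return len(set(trajectory))
-- ===== Notes on version B (the rewrite author's own statement) =====
-- stated objective: alternative
-- what changed: A walks once, testing membership of each new position in the visited list and counting as it goes; B builds the x and y cumulative-coordinate sequences in two separate boolean-arithmetic passes (no branch chain, no membership test), zips them into the trajectory and collapses it afterwards with set()/dict.fromkeys.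
-- outside the precondition, e.g. on find_houses_delivered('', True): A returns [(0, 0)], B returns [(0, 0)]; on find_houses_delivered('>', True): A returns [(0, 0), (1, 0)], B returns [(0, 0), (1, 0)]
import Mathlib
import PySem

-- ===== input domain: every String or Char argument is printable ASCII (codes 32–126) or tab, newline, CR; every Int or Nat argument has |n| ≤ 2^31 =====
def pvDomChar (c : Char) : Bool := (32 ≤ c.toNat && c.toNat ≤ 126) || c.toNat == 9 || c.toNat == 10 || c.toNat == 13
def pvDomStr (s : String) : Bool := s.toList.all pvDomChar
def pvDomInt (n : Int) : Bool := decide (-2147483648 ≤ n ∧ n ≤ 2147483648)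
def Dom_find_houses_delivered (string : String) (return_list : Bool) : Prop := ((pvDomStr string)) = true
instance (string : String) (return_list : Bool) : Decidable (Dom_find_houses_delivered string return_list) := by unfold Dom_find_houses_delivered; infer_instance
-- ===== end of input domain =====

-- B replaces A's single walk with an interleaved membership test by two staged
-- cumulative-coordinate passes (boolean arithmetic, no branch chain) zipped into the
-- trajectory and collapsed afterwards by set(); return value only, proved for
-- return_list = false (the true branch returns a list, not an int — outside Pre_).

-- ===== PORT A =====
-- state: ((x, y), count, lst); the return_list = true branch of the Python returns
-- the list lst itself (not an Int), excluded by Pre_, so the port returns the count.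
def find_houses_delivered (string : String) (return_list : Bool) : Int :=
  let st := string.toList.foldl
    (fun (s : (Int × Int) × Int × List (Int × Int)) (item : Char) =>
      let p := if item = '^' then (s.1.1, s.1.2 + 1)
               else if item = 'v' then (s.1.1, s.1.2 - 1)
               else if item = '>' then (s.1.1 + 1, s.1.2)
               else if item = '<' then (s.1.1 - 1, s.1.2)
               else s.1
      if s.2.2.contains p then (p, s.2.1, s.2.2)
      else (p, s.2.1 + 1, s.2.2 ++ [p]))
    ((0, 0), 1, [(0, 0)])
  st.2.1

-- ===== PORT B =====
-- xs/ys appends read xs[-1] via pyGet?; it is always some (the lists start nonempty),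
-- so .getD 0 is never the default. The return_list = true branch of Source B returns
-- list(dict.fromkeys(trajectory)) (not an Int), excluded by Pre_, so the port
-- returns len(set(trajectory)).
def find_houses_delivered_alt (string : String) (return_list : Bool) : Int :=
  let xs := string.toList.foldl
    (fun (xs : List Int) (item : Char) =>
      xs ++ [(PySem.List.pyGet? xs (-1)).getD 0
              + (if item = '>' then 1 else 0) - (if item = '<' then 1 else 0)]) [0]
  let ys := string.toList.foldl
    (fun (ys : List Int) (item : Char) =>
      ys ++ [(PySem.List.pyGet? ys (-1)).getD 0
              + (if item = '^' then 1 else 0) - (if item = 'v' then 1 else 0)]) [0]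
  let trajectory := List.zip xs ys
  ((PySem.Set.ofList trajectory).length : Int)

-- ===== PRECONDITION & SPEC =====
-- Pre_ excludes return_list = true: there both Pythons return a LIST of houses
-- (identical in both), which is not a value of the declared return type Int.
def Pre_find_houses_delivered (string : String) (return_list : Bool) : Prop :=
  return_list = false
instance (string : String) (return_list : Bool) : Decidable (Pre_find_houses_delivered string return_list) := by unfold Pre_find_houses_delivered; infer_instance

def pvWitness_find_houses_delivered : String × Bool := ("^>v<>>", false)

def Spec_find_houses_delivered (string : String) (return_list : Bool) (out : Int) : Prop := out = find_houses_delivered_alt string return_list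
instance (string : String) (return_list : Bool) (out : Int) : Decidable (Spec_find_houses_delivered string return_list out) := by unfold Spec_find_houses_delivered; infer_instance

-- ===== CLAIM (what is proved, stated in full; the proofs are below) =====
def Claim_equal_find_houses_delivered : Prop := ∀ (string : String) (return_list : Bool), Dom_find_houses_delivered string return_list → Pre_find_houses_delivered string return_list → Spec_find_houses_delivered string return_list (find_houses_delivered string return_list)

-- ===== LEMMAS AND PROOFS =====

-- the position update A's loop body performs
def pvMove (p : Int × Int) (item : Char) : Int × Int :=
  if item = '^' then (p.1, p.2 + 1)
  else if item = 'v' then (p.1, p.2 - 1)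
  else if item = '>' then (p.1 + 1, p.2)
  else if item = '<' then (p.1 - 1, p.2)
  else p

-- the successive positions visited after the start position
def pvPositions : List Char → (Int × Int) → List (Int × Int)
  | [], _ => []
  | c :: cs, p => pvMove p c :: pvPositions cs (pvMove p c)

-- B's one-coordinate update (cp = char increasing it, cm = char decreasing it)
def pvStep (cp cm : Char) (x : Int) (c : Char) : Int :=
  x + (if c = cp then 1 else 0) - (if c = cm then 1 else 0)

-- the successive values of one cumulative coordinate after the start value
def pvScan (cp cm : Char) : List Char → Int → List Int
  | [], _ => []
  | c :: cs, x => pvStep cp cm x c :: pvScan cp cm cs (pvStep cp cm x c)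

theorem pvLemA (cs : List Char) (p : Int × Int) (l : List (Int × Int)) (c : Int)
    (hc : c = (l.length : Int)) :
    List.foldl
      (fun (s : (Int × Int) × Int × List (Int × Int)) (item : Char) =>
        let p := if item = '^' then (s.1.1, s.1.2 + 1)
                 else if item = 'v' then (s.1.1, s.1.2 - 1)
                 else if item = '>' then (s.1.1 + 1, s.1.2)
                 else if item = '<' then (s.1.1 - 1, s.1.2)
                 else s.1
        if s.2.2.contains p then (p, s.2.1, s.2.2)
        else (p, s.2.1 + 1, s.2.2 ++ [p]))
      (p, (c, l)) cs
    = (List.foldl pvMove p cs,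
       (((List.foldl PySem.Set.add l (pvPositions cs p)).length : Int),
        List.foldl PySem.Set.add l (pvPositions cs p))) := by
  subst hc
  induction cs generalizing p l with
  | nil => simp [pvPositions]
  | cons c cs ih =>
      have hstep :
          (let q := if c = '^' then (p.1, p.2 + 1)
                    else if c = 'v' then (p.1, p.2 - 1)
                    else if c = '>' then (p.1 + 1, p.2)
                    else if c = '<' then (p.1 - 1, p.2)
                    else p
           if l.contains q then (q, ((l.length : Int), l))
           else (q, ((l.length : Int) + 1, l ++ [q])))
          = (pvMove p c, (((PySem.Set.add l (pvMove p c)).length : Int),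
              PySem.Set.add l (pvMove p c))) := by
        by_cases h : pvMove p c ∈ l <;>
          simp only [pvMove, PySem.Set.add, PySem.Set.contains, List.contains_eq_mem,
            decide_eq_true_eq] at h ⊢ <;>
          simp [h]
      simp only [List.foldl_cons, pvPositions]
      rw [hstep]
      exact ih (pvMove p c) (PySem.Set.add l (pvMove p c))

-- one cumulative-coordinate pass of B produces start value followed by pvScan
theorem pvLemScan (cp cm : Char) (cs : List Char) (acc : List Int) (x : Int) :
    List.foldl
      (fun (l : List Int) (item : Char) =>
        l ++ [(PySem.List.pyGet? l (-1)).getD 0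
               + (if item = cp then 1 else 0) - (if item = cm then 1 else 0)])
      (acc ++ [x]) cs
    = acc ++ [x] ++ pvScan cp cm cs x := by
  induction cs generalizing acc x with
  | nil => simp [pvScan]
  | cons c cs ih =>
      simp only [List.foldl_cons, pvScan]
      rw [PySem.List.pyGet?_neg_one_append_singleton]
      have := ih (acc ++ [x]) (pvStep cp cm x c)
      simp only [pvStep] at this
      rw [List.append_assoc] at this ⊢
      simpa [pvStep] using this

-- zipping the two coordinate scans gives the position trajectory
theorem pvLemZip (cs : List Char) (x y : Int) :
    List.zip (pvScan '>' '<' cs x) (pvScan '^' 'v' cs y) = pvPositions cs (x, y) := by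
  induction cs generalizing x y with
  | nil => simp [pvScan, pvPositions]
  | cons c cs ih =>
      have hmove : (pvStep '>' '<' x c, pvStep '^' 'v' y c) = pvMove (x, y) c := by
        by_cases h1 : c = '^' <;> by_cases h2 : c = 'v' <;>
          by_cases h3 : c = '>' <;> by_cases h4 : c = '<' <;>
          simp_all [pvStep, pvMove]
      simp only [pvScan, pvPositions, List.zip_cons_cons]
      rw [ih, hmove]

-- ===== VERDICT (by name: the statement is the Claim_ definition above) =====
theorem find_houses_delivered_spec : Claim_equal_find_houses_delivered := by
  intro string return_list _ _
  unfold Spec_find_houses_delivered find_houses_delivered find_houses_delivered_alt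
  have hx := pvLemScan '>' '<' string.toList [] 0
  have hy := pvLemScan '^' 'v' string.toList [] 0
  simp only [List.nil_append] at hx hy
  dsimp only
  rw [pvLemA string.toList (0, 0) [((0 : Int), (0 : Int))] 1 (by norm_num)]
  dsimp only
  rw [hx, hy]
  simp only [List.singleton_append]
  rw [List.zip_cons_cons, pvLemZip]
  simp only [PySem.Set.ofList_eq_foldl]
  have h0 : (((0 : Int), (0 : Int)) :: pvPositions string.toList (0, 0)).foldl PySem.Set.add []
      = (pvPositions string.toList (0, 0)).foldl PySem.Set.add [((0 : Int), (0 : Int))] := by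
    simp [PySem.Set.add, PySem.Set.contains]
  rw [h0]
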